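-- pv_equiv track=rewrite | github.com/YuanweiWu911/Project_UT1_LOD_prediction | developed_yuanwei/iers/miscfunc_30.py | get_leap_second
-- ===== SOURCE A (Python) =====
-- def get_leap_second(mjd):
--      leap_sec_epochs = [57754, 57204,56109,54832,53736,51179,50630,50083,49534,49169,48804,48257, \
--      47892,47161,46247,45516,45151,44786,44239,43874,43509, \
--      43144,42778,42413,42048,41683,41499,41317]
--
--      sec = [37,36,35,34,33,32,31,30,29,28,27,26,25,24,23,22,21,20,19,18,17,\
--             16,15,14,13,12,11,10]
--
--      for i in range(len(leap_sec_epochs)):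
--             if mjd >= leap_sec_epochs[i]:
--                    return sec[i]
--                    break
-- ===== SOURCE B (Python) =====
-- def get_leap_second(mjd):
--     # Ascending table of leap-second epochs with their TAI-UTC seconds;
--     # binary search (bisect_right) for the largest epoch <= mjd.
--     epochs = [41317, 41499, 41683, 42048, 42413, 42778, 43144, 43509, 43874,
--               44239, 44786, 45151, 45516, 46247, 47161, 47892, 48257, 48804,
--               49169, 49534, 50083, 50630, 51179, 53736, 54832, 56109, 57204,
--               57754]
--     secs = [10, 11, 12, 13, 14, 15, 16, 17, 18, 19, 20, 21, 22, 23, 24, 25,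
--             26, 27, 28, 29, 30, 31, 32, 33, 34, 35, 36, 37]
--     lo, hi = 0, len(epochs)
--     while lo < hi:
--         mid = (lo + hi) // 2
--         if mjd < epochs[mid]:
--             hi = mid
--         else:
--             lo = mid + 1
--     return secs[lo - 1] if lo > 0 else None
-- ===== Notes on version B (the rewrite author's own statement) =====
-- stated objective: idiomatic
-- what changed: Replaced the descending linear fall-through scan with an ascending table and a bisect_right-style binary search returning the entry for the largest epoch <= mjd.
import Mathlib
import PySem

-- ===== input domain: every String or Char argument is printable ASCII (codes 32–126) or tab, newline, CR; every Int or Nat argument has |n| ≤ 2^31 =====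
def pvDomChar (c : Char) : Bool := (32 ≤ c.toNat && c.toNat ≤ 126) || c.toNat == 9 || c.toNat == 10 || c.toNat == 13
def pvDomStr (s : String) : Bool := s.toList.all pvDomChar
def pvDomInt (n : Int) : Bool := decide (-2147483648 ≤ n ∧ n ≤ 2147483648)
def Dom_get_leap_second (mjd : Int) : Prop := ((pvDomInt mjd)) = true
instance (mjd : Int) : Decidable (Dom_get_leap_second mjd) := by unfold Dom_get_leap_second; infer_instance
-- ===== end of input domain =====

-- B replaces A's descending linear fall-through scan by a binary search (bisect_right)
-- over the ascending epoch table; objective: idiomatic. Same return value everywhere.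

-- ===== PORT A =====
-- descending epoch table, as in A
def pvEpochsA : List Int := [57754, 57204, 56109, 54832, 53736, 51179, 50630, 50083, 49534, 49169,
  48804, 48257, 47892, 47161, 46247, 45516, 45151, 44786, 44239, 43874, 43509, 43144, 42778,
  42413, 42048, 41683, 41499, 41317]

def pvSecA : List Int := [37, 36, 35, 34, 33, 32, 31, 30, 29, 28, 27, 26, 25, 24, 23, 22, 21, 20,
  19, 18, 17, 16, 15, 14, 13, 12, 11, 10]

-- the 'for i in range(len(...)): if mjd >= epochs[i]: return sec[i]' loop, with early return
def pvLoopA (mjd : Int) : List Int → Option Int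
  | [] => none
  | i :: rest =>
    match PySem.List.pyGet? pvEpochsA i with
    | none => none   -- unreachable: i produced by range(len(epochs))
    | some e => if mjd ≥ e then PySem.List.pyGet? pvSecA i else pvLoopA mjd rest

def get_leap_second (mjd : Int) : Option Int :=
  pvLoopA mjd (PySem.List.pyRange 0 (Int.ofNat pvEpochsA.length) 1)

-- ===== PORT B =====
-- ascending tables, as in Source B
def pvEpochsB : List Int := [41317, 41499, 41683, 42048, 42413, 42778, 43144, 43509, 43874, 44239,
  44786, 45151, 45516, 46247, 47161, 47892, 48257, 48804, 49169, 49534, 50083, 50630, 51179,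
  53736, 54832, 56109, 57204, 57754]

def pvSecB : List Int := [10, 11, 12, 13, 14, 15, 16, 17, 18, 19, 20, 21, 22, 23, 24, 25, 26, 27,
  28, 29, 30, 31, 32, 33, 34, 35, 36, 37]

-- the bisect_right while-loop of Source B; epochs[mid] is always in range, ported with getD;
-- the fuel argument (initially hi - lo = len(epochs)) only bounds the loop for totality
def pvBisect (mjd : Int) : Nat → Nat → Nat → Nat
  | 0, lo, _ => lo
  | fuel + 1, lo, hi =>
    if lo < hi then
      let mid := (lo + hi) / 2
      if mjd < pvEpochsB.getD mid 0 then pvBisect mjd fuel lo mid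
      else pvBisect mjd fuel (mid + 1) hi
    else lo

def get_leap_second_alt (mjd : Int) : Option Int :=
  let lo := pvBisect mjd pvEpochsB.length 0 pvEpochsB.length
  if lo > 0 then some (pvSecB.getD (lo - 1) 0) else none

-- ===== PRECONDITION & SPEC =====
def Spec_get_leap_second (mjd : Int) (out : Option Int) : Prop := out = get_leap_second_alt mjd
instance (mjd : Int) (out : Option Int) : Decidable (Spec_get_leap_second mjd out) := by unfold Spec_get_leap_second; infer_instance

-- ===== CLAIM (what is proved, stated in full; the proofs are below) =====
def Claim_equal_get_leap_second : Prop := ∀ (mjd : Int), Dom_get_leap_second mjd → Spec_get_leap_second mjd (get_leap_second mjd)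

-- ===== LEMMAS AND PROOFS =====
theorem pvRangeLit : PySem.List.pyRange 0 (Int.ofNat pvEpochsA.length) 1 = [0, 1, 2, 3, 4, 5, 6, 7, 8, 9, 10, 11, 12, 13, 14, 15, 16, 17, 18, 19, 20, 21, 22, 23, 24, 25, 26, 27] := by decide

-- common closed form: A's linear scan reduced to a chain of ifs
def pvRef (mjd : Int) : Option Int := if mjd ≥ 57754 then some 37 else if mjd ≥ 57204 then some 36 else if mjd ≥ 56109 then some 35 else if mjd ≥ 54832 then some 34 else if mjd ≥ 53736 then some 33 else if mjd ≥ 51179 then some 32 else if mjd ≥ 50630 then some 31 else if mjd ≥ 50083 then some 30 else if mjd ≥ 49534 then some 29 else if mjd ≥ 49169 then some 28 else if mjd ≥ 48804 then some 27 else if mjd ≥ 48257 then some 26 else if mjd ≥ 47892 then some 25 else if mjd ≥ 47161 then some 24 else if mjd ≥ 46247 then some 23 else if mjd ≥ 45516 then some 22 else if mjd ≥ 45151 then some 21 else if mjd ≥ 44786 then some 20 else if mjd ≥ 44239 then some 19 else if mjd ≥ 43874 then some 18 else if mjd ≥ 43509 then some 17 else if mjd ≥ 43144 then some 16 else if mjd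 ≥ 42778 then some 15 else if mjd ≥ 42413 then some 14 else if mjd ≥ 42048 then some 13 else if mjd ≥ 41683 then some 12 else if mjd ≥ 41499 then some 11 else if mjd ≥ 41317 then some 10 else none

-- the bisect position as a literal decision tree (pvBisect fully unfolded)
def pvPos (mjd : Int) : Nat :=
  if mjd < 47161 then
    if mjd < 43509 then
      if mjd < 42048 then if mjd < 41499 then if mjd < 41317 then 0 else 1 else if mjd < 41683 then 2 else 3
      else if mjd < 42778 then if mjd < 42413 then 4 else 5 else if mjd < 43144 then 6 else 7
    else
      if mjd < 45151 then if mjd < 44239 then if mjd < 43874 then 8 else 9 else if mjd < 44786 then 10 else 11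
      else if mjd < 46247 then if mjd < 45516 then 12 else 13 else 14
  else
    if mjd < 50630 then
      if mjd < 49169 then if mjd < 48257 then if mjd < 47892 then 15 else 16 else if mjd < 48804 then 17 else 18
      else if mjd < 50083 then if mjd < 49534 then 19 else 20 else 21
    else
      if mjd < 56109 then if mjd < 53736 then if mjd < 51179 then 22 else 23 else if mjd < 54832 then 24 else 25
      else if mjd < 57754 then if mjd < 57204 then 26 else 27 else 28

set_option maxRecDepth 10000 in
set_option maxHeartbeats 2000000 in
theorem pvA_ref (mjd : Int) : get_leap_second mjd = pvRef mjd := by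
  unfold get_leap_second pvRef
  rw [pvRangeLit]
  simp [pvLoopA, PySem.List.pyGet?, PySem.List.pyIdx?, pvEpochsA, pvSecA]

set_option maxRecDepth 10000 in
set_option maxHeartbeats 2000000 in
theorem pvBisect_pos (mjd : Int) : pvBisect mjd 28 0 28 = pvPos mjd := by
  unfold pvPos
  simp [pvBisect, pvEpochsB]

set_option maxRecDepth 10000 in
set_option maxHeartbeats 8000000 in
theorem pv_eq (mjd : Int) : get_leap_second mjd = get_leap_second_alt mjd := by
  rw [pvA_ref]
  unfold get_leap_second_alt
  rw [show pvEpochsB.length = 28 from rfl, pvBisect_pos]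
  by_cases h1 : mjd ≥ 57754
  · have hp : pvPos mjd = 28 := by unfold pvPos; split_ifs <;> omega
    rw [hp]; unfold pvRef; rw [if_pos h1]; rfl
  by_cases h2 : mjd ≥ 57204
  · have hp : pvPos mjd = 27 := by unfold pvPos; split_ifs <;> omega
    rw [hp]; unfold pvRef; rw [if_neg h1, if_pos h2]; rfl
  by_cases h3 : mjd ≥ 56109
  · have hp : pvPos mjd = 26 := by unfold pvPos; split_ifs <;> omega
    rw [hp]; unfold pvRef; rw [if_neg h1, if_neg h2, if_pos h3]; rfl
  by_cases h4 : mjd ≥ 54832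
  · have hp : pvPos mjd = 25 := by unfold pvPos; split_ifs <;> omega
    rw [hp]; unfold pvRef; rw [if_neg h1, if_neg h2, if_neg h3, if_pos h4]; rfl
  by_cases h5 : mjd ≥ 53736
  · have hp : pvPos mjd = 24 := by unfold pvPos; split_ifs <;> omega
    rw [hp]; unfold pvRef; rw [if_neg h1, if_neg h2, if_neg h3, if_neg h4, if_pos h5]; rfl
  by_cases h6 : mjd ≥ 51179
  · have hp : pvPos mjd = 23 := by unfold pvPos; split_ifs <;> omega
    rw [hp]; unfold pvRef; rw [if_neg h1, if_neg h2, if_neg h3, if_neg h4, if_neg h5, if_pos h6]; rfl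
  by_cases h7 : mjd ≥ 50630
  · have hp : pvPos mjd = 22 := by unfold pvPos; split_ifs <;> omega
    rw [hp]; unfold pvRef; rw [if_neg h1, if_neg h2, if_neg h3, if_neg h4, if_neg h5, if_neg h6, if_pos h7]; rfl
  by_cases h8 : mjd ≥ 50083
  · have hp : pvPos mjd = 21 := by unfold pvPos; split_ifs <;> omega
    rw [hp]; unfold pvRef; rw [if_neg h1, if_neg h2, if_neg h3, if_neg h4, if_neg h5, if_neg h6, if_neg h7, if_pos h8]; rfl
  by_cases h9 : mjd ≥ 49534
  · have hp : pvPos mjd = 20 := by unfold pvPos; split_ifs <;> omega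
    rw [hp]; unfold pvRef; rw [if_neg h1, if_neg h2, if_neg h3, if_neg h4, if_neg h5, if_neg h6, if_neg h7, if_neg h8, if_pos h9]; rfl
  by_cases h10 : mjd ≥ 49169
  · have hp : pvPos mjd = 19 := by unfold pvPos; split_ifs <;> omega
    rw [hp]; unfold pvRef; rw [if_neg h1, if_neg h2, if_neg h3, if_neg h4, if_neg h5, if_neg h6, if_neg h7, if_neg h8, if_neg h9, if_pos h10]; rfl
  by_cases h11 : mjd ≥ 48804
  · have hp : pvPos mjd = 18 := by unfold pvPos; split_ifs <;> omega
    rw [hp]; unfold pvRef; rw [if_neg h1, if_neg h2, if_neg h3, if_neg h4, if_neg h5, if_neg h6, if_neg h7, if_neg h8, if_neg h9, if_neg h10, if_pos h11]; rfl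
  by_cases h12 : mjd ≥ 48257
  · have hp : pvPos mjd = 17 := by unfold pvPos; split_ifs <;> omega
    rw [hp]; unfold pvRef; rw [if_neg h1, if_neg h2, if_neg h3, if_neg h4, if_neg h5, if_neg h6, if_neg h7, if_neg h8, if_neg h9, if_neg h10, if_neg h11, if_pos h12]; rfl
  by_cases h13 : mjd ≥ 47892
  · have hp : pvPos mjd = 16 := by unfold pvPos; split_ifs <;> omega
    rw [hp]; unfold pvRef; rw [if_neg h1, if_neg h2, if_neg h3, if_neg h4, if_neg h5, if_neg h6, if_neg h7, if_neg h8, if_neg h9, if_neg h10, if_neg h11, if_neg h12, if_pos h13]; rfl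
  by_cases h14 : mjd ≥ 47161
  · have hp : pvPos mjd = 15 := by unfold pvPos; split_ifs <;> omega
    rw [hp]; unfold pvRef; rw [if_neg h1, if_neg h2, if_neg h3, if_neg h4, if_neg h5, if_neg h6, if_neg h7, if_neg h8, if_neg h9, if_neg h10, if_neg h11, if_neg h12, if_neg h13, if_pos h14]; rfl
  by_cases h15 : mjd ≥ 46247
  · have hp : pvPos mjd = 14 := by unfold pvPos; split_ifs <;> omega
    rw [hp]; unfold pvRef; rw [if_neg h1, if_neg h2, if_neg h3, if_neg h4, if_neg h5, if_neg h6, if_neg h7, if_neg h8, if_neg h9, if_neg h10, if_neg h11, if_neg h12, if_neg h13, if_neg h14, if_pos h15]; rfl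
  by_cases h16 : mjd ≥ 45516
  · have hp : pvPos mjd = 13 := by unfold pvPos; split_ifs <;> omega
    rw [hp]; unfold pvRef; rw [if_neg h1, if_neg h2, if_neg h3, if_neg h4, if_neg h5, if_neg h6, if_neg h7, if_neg h8, if_neg h9, if_neg h10, if_neg h11, if_neg h12, if_neg h13, if_neg h14, if_neg h15, if_pos h16]; rfl
  by_cases h17 : mjd ≥ 45151
  · have hp : pvPos mjd = 12 := by unfold pvPos; split_ifs <;> omega
    rw [hp]; unfold pvRef; rw [if_neg h1, if_neg h2, if_neg h3, if_neg h4, if_neg h5, if_neg h6, if_neg h7, if_neg h8, if_neg h9, if_neg h10, if_neg h11, if_neg h12, if_neg h13, if_neg h14, if_neg h15, if_neg h16, if_pos h17]; rfl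
  by_cases h18 : mjd ≥ 44786
  · have hp : pvPos mjd = 11 := by unfold pvPos; split_ifs <;> omega
    rw [hp]; unfold pvRef; rw [if_neg h1, if_neg h2, if_neg h3, if_neg h4, if_neg h5, if_neg h6, if_neg h7, if_neg h8, if_neg h9, if_neg h10, if_neg h11, if_neg h12, if_neg h13, if_neg h14, if_neg h15, if_neg h16, if_neg h17, if_pos h18]; rfl
  by_cases h19 : mjd ≥ 44239
  · have hp : pvPos mjd = 10 := by unfold pvPos; split_ifs <;> omega
    rw [hp]; unfold pvRef; rw [if_neg h1, if_neg h2, if_neg h3, if_neg h4, if_neg h5, if_neg h6, if_neg h7, if_neg h8, if_neg h9, if_neg h10, if_neg h11, if_neg h12, if_neg h13, if_neg h14, if_neg h15, if_neg h16, if_neg h17, if_neg h18, if_pos h19]; rfl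
  by_cases h20 : mjd ≥ 43874
  · have hp : pvPos mjd = 9 := by unfold pvPos; split_ifs <;> omega
    rw [hp]; unfold pvRef; rw [if_neg h1, if_neg h2, if_neg h3, if_neg h4, if_neg h5, if_neg h6, if_neg h7, if_neg h8, if_neg h9, if_neg h10, if_neg h11, if_neg h12, if_neg h13, if_neg h14, if_neg h15, if_neg h16, if_neg h17, if_neg h18, if_neg h19, if_pos h20]; rfl
  by_cases h21 : mjd ≥ 43509
  · have hp : pvPos mjd = 8 := by unfold pvPos; split_ifs <;> omega
    rw [hp]; unfold pvRef; rw [if_neg h1, if_neg h2, if_neg h3, if_neg h4, if_neg h5, if_neg h6, if_neg h7, if_neg h8, if_neg h9, if_neg h10, if_neg h11, if_neg h12, if_neg h13, if_neg h14, if_neg h15, if_neg h16, if_neg h17, if_neg h18, if_neg h19, if_neg h20, if_pos h21]; rfl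
  by_cases h22 : mjd ≥ 43144
  · have hp : pvPos mjd = 7 := by unfold pvPos; split_ifs <;> omega
    rw [hp]; unfold pvRef; rw [if_neg h1, if_neg h2, if_neg h3, if_neg h4, if_neg h5, if_neg h6, if_neg h7, if_neg h8, if_neg h9, if_neg h10, if_neg h11, if_neg h12, if_neg h13, if_neg h14, if_neg h15, if_neg h16, if_neg h17, if_neg h18, if_neg h19, if_neg h20, if_neg h21, if_pos h22]; rfl
  by_cases h23 : mjd ≥ 42778
  · have hp : pvPos mjd = 6 := by unfold pvPos; split_ifs <;> omega
    rw [hp]; unfold pvRef; rw [if_neg h1, if_neg h2, if_neg h3, if_neg h4, if_neg h5, if_neg h6, if_neg h7, if_neg h8, if_neg h9, if_neg h10, if_neg h11, if_neg h12, if_neg h13, if_neg h14, if_neg h15, if_neg h16, if_neg h17, if_neg h18, if_neg h19, if_neg h20, if_neg h21, if_neg h22, if_pos h23]; rfl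
  by_cases h24 : mjd ≥ 42413
  · have hp : pvPos mjd = 5 := by unfold pvPos; split_ifs <;> omega
    rw [hp]; unfold pvRef; rw [if_neg h1, if_neg h2, if_neg h3, if_neg h4, if_neg h5, if_neg h6, if_neg h7, if_neg h8, if_neg h9, if_neg h10, if_neg h11, if_neg h12, if_neg h13, if_neg h14, if_neg h15, if_neg h16, if_neg h17, if_neg h18, if_neg h19, if_neg h20, if_neg h21, if_neg h22, if_neg h23, if_pos h24]; rfl
  by_cases h25 : mjd ≥ 42048
  · have hp : pvPos mjd = 4 := by unfold pvPos; split_ifs <;> omega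
    rw [hp]; unfold pvRef; rw [if_neg h1, if_neg h2, if_neg h3, if_neg h4, if_neg h5, if_neg h6, if_neg h7, if_neg h8, if_neg h9, if_neg h10, if_neg h11, if_neg h12, if_neg h13, if_neg h14, if_neg h15, if_neg h16, if_neg h17, if_neg h18, if_neg h19, if_neg h20, if_neg h21, if_neg h22, if_neg h23, if_neg h24, if_pos h25]; rfl
  by_cases h26 : mjd ≥ 41683
  · have hp : pvPos mjd = 3 := by unfold pvPos; split_ifs <;> omega
    rw [hp]; unfold pvRef; rw [if_neg h1, if_neg h2, if_neg h3, if_neg h4, if_neg h5, if_neg h6, if_neg h7, if_neg h8, if_neg h9, if_neg h10, if_neg h11, if_neg h12, if_neg h13, if_neg h14, if_neg h15, if_neg h16, if_neg h17, if_neg h18, if_neg h19, if_neg h20, if_neg h21, if_neg h22, if_neg h23, if_neg h24, if_neg h25, if_pos h26]; rfl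
  by_cases h27 : mjd ≥ 41499
  · have hp : pvPos mjd = 2 := by unfold pvPos; split_ifs <;> omega
    rw [hp]; unfold pvRef; rw [if_neg h1, if_neg h2, if_neg h3, if_neg h4, if_neg h5, if_neg h6, if_neg h7, if_neg h8, if_neg h9, if_neg h10, if_neg h11, if_neg h12, if_neg h13, if_neg h14, if_neg h15, if_neg h16, if_neg h17, if_neg h18, if_neg h19, if_neg h20, if_neg h21, if_neg h22, if_neg h23, if_neg h24, if_neg h25, if_neg h26, if_pos h27]; rfl
  by_cases h28 : mjd ≥ 41317
  · have hp : pvPos mjd = 1 := by unfold pvPos; split_ifs <;> omega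
    rw [hp]; unfold pvRef; rw [if_neg h1, if_neg h2, if_neg h3, if_neg h4, if_neg h5, if_neg h6, if_neg h7, if_neg h8, if_neg h9, if_neg h10, if_neg h11, if_neg h12, if_neg h13, if_neg h14, if_neg h15, if_neg h16, if_neg h17, if_neg h18, if_neg h19, if_neg h20, if_neg h21, if_neg h22, if_neg h23, if_neg h24, if_neg h25, if_neg h26, if_neg h27, if_pos h28]; rfl
  have hp : pvPos mjd = 0 := by unfold pvPos; split_ifs <;> omega
  rw [hp]; unfold pvRef; rw [if_neg h1, if_neg h2, if_neg h3, if_neg h4, if_neg h5, if_neg h6, if_neg h7, if_neg h8, if_neg h9, if_neg h10, if_neg h11, if_neg h12, if_neg h13, if_neg h14, if_neg h15, if_neg h16, if_neg h17, if_neg h18, if_neg h19, if_neg h20, if_neg h21, if_neg h22, if_neg h23, if_neg h24, if_neg h25, if_neg h26, if_neg h27, if_neg h28]; rfl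

-- ===== VERDICT (by name: the statement is the Claim_ definition above) =====
theorem get_leap_second_spec : Claim_equal_get_leap_second := by
  intro mjd _
  unfold Spec_get_leap_second
  exact pv_eq mjd
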